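-- pv_equiv track=rewrite | github.com/Vpathre/resolute_catalogue | main.py | dropdown_streams
-- ===== SOURCE A (Python) =====
-- def dropdown_streams(streams):
--     '''
--     Creates a text field corresponding to the streams selected and returns the quantity as text
--     '''
--     str_array = []  # array used to compute dropdown
--     return_array = [] # array used to compute quantity
--     for i in range(len(streams)):
--         if streams[i][0] == "Novice Stream":
--             str_array.append(1)
--             return_array.append(f"Novice: {streams[i][1]}")
--         if streams[i][0] == "Apprentice Stream":
--             str_array.append(2)
--             return_array.append(f"Apprentice: {streams[i][1]}")
--         if streams[i][0] == "Adept Stream":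
--             str_array.append(3)
--             return_array.append(f"Adept: {streams[i][1]}")
--         if streams[i][0] == "Beginner Stream":
--             str_array.append(4)
--             return_array.append(f"Beginner: {streams[i][1]}")
--         if streams[i][0] == "Advanced Stream":
--             str_array.append(5)
--             return_array.append(f"Advanced: {streams[i][1]}")
--         if streams[i][0] == "Master Stream":
--             str_array.append(6)
--             return_array.append(f"Master: {streams[i][1]}")
--
--     str_array.sort()
--     temp = list(map(str, str_array))
--     return_str = ','. join(temp)
--     return_str_2 = '\n'. join(return_array)
--     return [return_str, return_str_2]
-- ===== SOURCE B (Python) =====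
-- _TABLE = {
--     "Novice Stream": (1, "Novice: "),
--     "Apprentice Stream": (2, "Apprentice: "),
--     "Adept Stream": (3, "Adept: "),
--     "Beginner Stream": (4, "Beginner: "),
--     "Advanced Stream": (5, "Advanced: "),
--     "Master Stream": (6, "Master: "),
-- }
--
-- def dropdown_streams(streams):
--     counts = [0] * 7
--     return_array = []
--     for name, val in streams:
--         entry = _TABLE.get(name)
--         if entry is not None:
--             rank, prefix = entry
--             counts[rank] += 1
--             return_array.append(prefix + val)
--     nums = []
--     for rank in range(1, 7):
--         nums.extend([str(rank)] * counts[rank])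
--     return [",".join(nums), "\n".join(return_array)]
-- ===== Notes on version B (the rewrite author's own statement) =====
-- stated objective: alternative
-- what changed: Replaces the six-way if-chain plus comparison sort by a name-to-(rank,prefix) table lookup and a counting pass: one forward loop tallies ranks and builds the dropdown lines, and the numeric string is emitted directly from the tally (counting sort) without any sort call.
import Mathlib
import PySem

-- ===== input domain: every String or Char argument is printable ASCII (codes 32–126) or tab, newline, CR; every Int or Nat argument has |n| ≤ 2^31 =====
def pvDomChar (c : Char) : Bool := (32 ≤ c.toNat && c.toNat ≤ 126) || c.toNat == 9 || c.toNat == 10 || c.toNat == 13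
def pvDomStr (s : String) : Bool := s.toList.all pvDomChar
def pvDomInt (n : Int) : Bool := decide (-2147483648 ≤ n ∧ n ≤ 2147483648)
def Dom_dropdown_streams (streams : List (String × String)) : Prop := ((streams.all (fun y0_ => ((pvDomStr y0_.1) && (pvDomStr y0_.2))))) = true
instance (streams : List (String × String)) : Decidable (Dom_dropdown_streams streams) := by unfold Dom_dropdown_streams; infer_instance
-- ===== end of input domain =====

-- B replaces the six-way if-chain plus comparison sort by a name→(rank, prefix) table and a
-- counting pass: one forward loop tallies ranks and builds the dropdown lines, and the numeric
-- string is emitted from the tally without sorting (objective: alternative/simpler).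

-- ===== PORT A =====
-- one iteration of A's loop body: six independent ifs appending to (str_array, return_array)
def pvStepA (acc : List Int × List String) (s : String × String) : List Int × List String :=
  let acc := if s.1 == "Novice Stream" then (acc.1 ++ [(1 : Int)], acc.2 ++ ["Novice: " ++ s.2]) else acc
  let acc := if s.1 == "Apprentice Stream" then (acc.1 ++ [(2 : Int)], acc.2 ++ ["Apprentice: " ++ s.2]) else acc
  let acc := if s.1 == "Adept Stream" then (acc.1 ++ [(3 : Int)], acc.2 ++ ["Adept: " ++ s.2]) else acc
  let acc := if s.1 == "Beginner Stream" then (acc.1 ++ [(4 : Int)], acc.2 ++ ["Beginner: " ++ s.2]) else acc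
  let acc := if s.1 == "Advanced Stream" then (acc.1 ++ [(5 : Int)], acc.2 ++ ["Advanced: " ++ s.2]) else acc
  let acc := if s.1 == "Master Stream" then (acc.1 ++ [(6 : Int)], acc.2 ++ ["Master: " ++ s.2]) else acc
  acc

def dropdown_streams (streams : List (String × String)) : List String :=
  let st := streams.foldl pvStepA ([], [])
  let str_array := PySem.List.sorted st.1 (fun x => x) false
  let temp := str_array.map PySem.Int.toStr
  let return_str := PySem.Str.join "," temp
  let return_str_2 := PySem.Str.join "\n" st.2
  [return_str, return_str_2]

-- ===== PORT B =====
-- the name → (rank, prefix) table of Source B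
def pvTable : PySem.Dict String (Int × String) := PySem.Dict.ofList
  [("Novice Stream", ((1 : Int), "Novice: ")),
   ("Apprentice Stream", ((2 : Int), "Apprentice: ")),
   ("Adept Stream", ((3 : Int), "Adept: ")),
   ("Beginner Stream", ((4 : Int), "Beginner: ")),
   ("Advanced Stream", ((5 : Int), "Advanced: ")),
   ("Master Stream", ((6 : Int), "Master: "))]

-- one iteration of Source B's loop: table lookup, tally the rank, append the line
def pvStepB (acc : List Int × List String) (s : String × String) : List Int × List String :=
  match PySem.Dict.get? pvTable s.1 with
  | some (rank, pre) =>
      (acc.1.set rank.toNat (acc.1.getD rank.toNat 0 + 1), acc.2 ++ [pre ++ s.2])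
  | none => acc

def dropdown_streams_alt (streams : List (String × String)) : List String :=
  let st := streams.foldl pvStepB ([0, 0, 0, 0, 0, 0, 0], [])
  let nums := (PySem.List.pyRange 1 7 1).flatMap
    (fun r => List.replicate (st.1.getD r.toNat 0).toNat (PySem.Int.toStr r))
  [PySem.Str.join "," nums, PySem.Str.join "\n" st.2]

-- ===== PRECONDITION & SPEC =====
def Spec_dropdown_streams (streams : List (String × String)) (out : List String) : Prop := out = dropdown_streams_alt streams
instance (streams : List (String × String)) (out : List String) : Decidable (Spec_dropdown_streams streams out) := by unfold Spec_dropdown_streams; infer_instance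

-- ===== CLAIM (what is proved, stated in full; the proofs are below) =====
def Claim_equal_dropdown_streams : Prop := ∀ (streams : List (String × String)), Dom_dropdown_streams streams → Spec_dropdown_streams streams (dropdown_streams streams)

-- ===== LEMMAS AND PROOFS =====

-- B's tally list expressed from A's str_array
def pvCounts (sa : List Int) : List Int :=
  [0, (sa.count 1 : Int), (sa.count 2 : Int), (sa.count 3 : Int),
   (sa.count 4 : Int), (sa.count 5 : Int), (sa.count 6 : Int)]

theorem pvTable_get (x : String) : PySem.Dict.get? pvTable x =
    if x = "Novice Stream" then some ((1 : Int), "Novice: ")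
    else if x = "Apprentice Stream" then some ((2 : Int), "Apprentice: ")
    else if x = "Adept Stream" then some ((3 : Int), "Adept: ")
    else if x = "Beginner Stream" then some ((4 : Int), "Beginner: ")
    else if x = "Advanced Stream" then some ((5 : Int), "Advanced: ")
    else if x = "Master Stream" then some ((6 : Int), "Master: ")
    else none := by
  by_cases hx1 : x = "Novice Stream"
  · subst hx1; decide
  by_cases hx2 : x = "Apprentice Stream"
  · subst hx2; simp [hx1]; decide
  by_cases hx3 : x = "Adept Stream"
  · subst hx3; simp [hx1, hx2]; decide
  by_cases hx4 : x = "Beginner Stream"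
  · subst hx4; simp [hx1, hx2, hx3]; decide
  by_cases hx5 : x = "Advanced Stream"
  · subst hx5; simp [hx1, hx2, hx3, hx4]; decide
  by_cases hx6 : x = "Master Stream"
  · subst hx6; simp [hx1, hx2, hx3, hx4, hx5]; decide
  have h : pvTable = PySem.Dict.mk
      [("Novice Stream", ((1 : Int), "Novice: ")),
       ("Apprentice Stream", ((2 : Int), "Apprentice: ")),
       ("Adept Stream", ((3 : Int), "Adept: ")),
       ("Beginner Stream", ((4 : Int), "Beginner: ")),
       ("Advanced Stream", ((5 : Int), "Advanced: ")),
       ("Master Stream", ((6 : Int), "Master: "))] := by decide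
  rw [h]
  simp [PySem.Dict.get?_mk_cons, PySem.Dict.get?, beq_iff_eq,
    Ne.symm hx1, Ne.symm hx2, Ne.symm hx3, Ne.symm hx4, Ne.symm hx5, Ne.symm hx6,
    hx1, hx2, hx3, hx4, hx5, hx6]

theorem pvStep_eq (sa : List Int) (ra : List String) (s : String × String) :
    pvStepB (pvCounts sa, ra) s = (pvCounts (pvStepA (sa, ra) s).1, (pvStepA (sa, ra) s).2) := by
  by_cases h1 : s.1 = "Novice Stream"
  · simp [pvStepA, pvStepB, pvTable_get, pvCounts, h1, List.count_append]
  by_cases h2 : s.1 = "Apprentice Stream"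
  · simp [pvStepA, pvStepB, pvTable_get, pvCounts, h1, h2, List.count_append]
  by_cases h3 : s.1 = "Adept Stream"
  · simp [pvStepA, pvStepB, pvTable_get, pvCounts, h1, h2, h3, List.count_append]
  by_cases h4 : s.1 = "Beginner Stream"
  · simp [pvStepA, pvStepB, pvTable_get, pvCounts, h1, h2, h3, h4, List.count_append]
  by_cases h5 : s.1 = "Advanced Stream"
  · simp [pvStepA, pvStepB, pvTable_get, pvCounts, h1, h2, h3, h4, h5, List.count_append]
  by_cases h6 : s.1 = "Master Stream"
  · simp [pvStepA, pvStepB, pvTable_get, pvCounts, h1, h2, h3, h4, h5, h6, List.count_append]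
  · simp [pvStepA, pvStepB, pvTable_get, h1, h2, h3, h4, h5, h6]

theorem pvLoop_eq : ∀ (streams : List (String × String)) (sa : List Int) (ra : List String),
    streams.foldl pvStepB (pvCounts sa, ra)
      = (pvCounts (streams.foldl pvStepA (sa, ra)).1, (streams.foldl pvStepA (sa, ra)).2) := by
  intro streams
  induction streams with
  | nil => intro sa ra; rfl
  | cons s t ih =>
      intro sa ra
      simp only [List.foldl_cons, pvStep_eq]
      rw [ih (pvStepA (sa, ra) s).1 (pvStepA (sa, ra) s).2]

theorem pvStepA_mem (acc : List Int × List String) (s : String × String) :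
    ∀ x ∈ (pvStepA acc s).1, x ∈ acc.1 ∨ (1 ≤ x ∧ x ≤ 6) := by
  intro x hx
  by_cases hm : x ∈ acc.1
  · exact Or.inl hm
  · right
    simp only [pvStepA] at hx
    split_ifs at hx <;> simp_all

theorem pvLoop_mem : ∀ (streams : List (String × String)) (sa : List Int) (ra : List String),
    (∀ x ∈ sa, 1 ≤ x ∧ x ≤ 6) →
    ∀ x ∈ (streams.foldl pvStepA (sa, ra)).1, 1 ≤ x ∧ x ≤ 6 := by
  intro streams
  induction streams with
  | nil => intro sa ra h x hx; exact h x hx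
  | cons s t ih =>
      intro sa ra h x hx
      rw [List.foldl_cons] at hx
      refine ih (pvStepA (sa, ra) s).1 (pvStepA (sa, ra) s).2 ?_ x (by simpa using hx)
      intro y hy
      rcases pvStepA_mem (sa, ra) s y hy with h' | h'
      · exact h y h'
      · exact h'

-- counting sort: a list of values in 1..6 sorts to the concatenation of its count-buckets
theorem pvSorted_buckets (sa : List Int) (hmem : ∀ x ∈ sa, 1 ≤ x ∧ x ≤ 6) :
    PySem.List.sorted sa (fun x => x) false
      = List.replicate (sa.count 1) (1 : Int) ++ List.replicate (sa.count 2) 2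
        ++ List.replicate (sa.count 3) 3 ++ List.replicate (sa.count 4) 4
        ++ List.replicate (sa.count 5) 5 ++ List.replicate (sa.count 6) 6 := by
  apply PySem.List.sorted_id_eq_of_perm_of_pairwise
  · rw [List.perm_iff_count]
    intro v
    by_cases h1 : v = 1
    · simp [h1, List.count_append, List.count_replicate]
    by_cases h2 : v = 2
    · simp [h2, List.count_append, List.count_replicate]
    by_cases h3 : v = 3
    · simp [h3, List.count_append, List.count_replicate]
    by_cases h4 : v = 4
    · simp [h4, List.count_append, List.count_replicate]
    by_cases h5 : v = 5
    · simp [h5, List.count_append, List.count_replicate]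
    by_cases h6 : v = 6
    · simp [h6, List.count_append, List.count_replicate]
    · have hz : sa.count v = 0 := by
        rw [List.count_eq_zero]
        intro hv
        have := hmem v hv
        omega
      have n1 : (1 : Int) ≠ v := fun h => h1 h.symm
      have n2 : (2 : Int) ≠ v := fun h => h2 h.symm
      have n3 : (3 : Int) ≠ v := fun h => h3 h.symm
      have n4 : (4 : Int) ≠ v := fun h => h4 h.symm
      have n5 : (5 : Int) ≠ v := fun h => h5 h.symm
      have n6 : (6 : Int) ≠ v := fun h => h6 h.symm
      simp [List.count_append, List.count_replicate, hz, n1, n2, n3, n4, n5, n6]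
  · simp only [List.pairwise_append, List.pairwise_replicate, List.mem_append,
      List.mem_replicate]
    refine ⟨⟨⟨⟨⟨?_, ?_, ?_⟩, ?_, ?_⟩, ?_, ?_⟩, ?_, ?_⟩, ?_, ?_⟩ <;>
      first
        | (intro a ha b hb; omega)
        | omega

-- ===== VERDICT (by name: the statement is the Claim_ definition above) =====
theorem dropdown_streams_spec : Claim_equal_dropdown_streams := by
  intro streams _
  unfold Spec_dropdown_streams
  simp only [dropdown_streams, dropdown_streams_alt]
  rw [show ([0, 0, 0, 0, 0, 0, 0] : List Int) = pvCounts [] from rfl, pvLoop_eq streams [] []]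
  have hmem := pvLoop_mem streams [] [] (by intro x hx; cases hx)
  have hrange : PySem.List.pyRange 1 7 1 = [1, 2, 3, 4, 5, 6] := by decide
  rw [pvSorted_buckets (streams.foldl pvStepA ([], [])).1 hmem, hrange]
  simp [pvCounts, List.flatMap_cons, List.map_append, List.map_replicate, List.getD]
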